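-- pv_equiv track=rewrite | github.com/piotrhelm/NESTFUL | data_v2/executable_functions/py_code_file_3831.py | filter_players
-- ===== SOURCE A (Python) =====
-- from typing import List, Dict
--
-- def filter_players(records: List[Dict], criteria: Dict) -> List[Dict]:
--
--     """Filters a list of dictionaries based on some criteria.
--
--
--
--     Args:
--
--         records: A list of dictionaries representing player records from a database.
--
--         criteria: A dictionary of search criteria. The keys correspond to database column names and the values are lists of acceptable values.
--
--
--
--     Returns:
--
--         A list of dictionaries that meet all the criteria.
--
--     """
--
--     filtered_records = []
--
--     for record in records:
--
--         is_valid = True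
--
--         for column, values in criteria.items():
--
--             if record.get(column) not in values:
--
--                 is_valid = False
--
--                 break
--
--         if is_valid:
--
--             filtered_records.append(record)
--
--     return filtered_records
-- ===== SOURCE B (Python) =====
-- from typing import List, Dict
--
-- def filter_players(records: List[Dict], criteria: Dict) -> List[Dict]:
--     """Progressive filter pipeline: narrow the candidate list once per criterion."""
--     result = list(records)
--     for column, values in criteria.items():
--         result = [r for r in result if r.get(column) in values]
--     return result
-- ===== Notes on version B (the rewrite author's own statement) =====
-- stated objective: idiomatic
-- what changed: B replaces A's per-record inner loop with an early break by a progressive filter pipeline that narrows one shrinking candidate list once per criterion via list comprehensions.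
import Mathlib
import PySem

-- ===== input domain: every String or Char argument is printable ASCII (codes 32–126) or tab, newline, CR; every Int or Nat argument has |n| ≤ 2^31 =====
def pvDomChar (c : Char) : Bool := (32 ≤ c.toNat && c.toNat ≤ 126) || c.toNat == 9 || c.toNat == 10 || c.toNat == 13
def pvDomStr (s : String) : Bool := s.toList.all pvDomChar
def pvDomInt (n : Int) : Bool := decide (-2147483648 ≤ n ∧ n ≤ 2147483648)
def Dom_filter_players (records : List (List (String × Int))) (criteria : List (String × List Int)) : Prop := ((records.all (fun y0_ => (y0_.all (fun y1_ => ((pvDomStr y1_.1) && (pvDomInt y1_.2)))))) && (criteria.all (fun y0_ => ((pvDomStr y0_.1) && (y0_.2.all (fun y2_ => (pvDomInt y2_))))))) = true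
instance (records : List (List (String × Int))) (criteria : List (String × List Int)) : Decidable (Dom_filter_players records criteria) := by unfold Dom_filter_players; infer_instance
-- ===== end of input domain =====

-- B narrows one shrinking candidate list once per criterion (filter pipeline) instead of
-- A's per-record inner loop with an early break; same cost, more idiomatic.

-- ===== PORT A =====
-- inner 'for column, values in criteria.items(): … break' loop computing is_valid
def pvAValid (record : List (String × Int)) : List (String × List Int) → Bool
  | [] => true
  | (column, values) :: rest =>
    if !(((PySem.Dict.mk record).get? column).map values.contains |>.getD false) then false
    else pvAValid record rest

def filter_players (records : List (List (String × Int))) (criteria : List (String × List Int)) : List (List (String × Int)) :=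
  records.foldl (fun filtered_records record =>
    if pvAValid record criteria then filtered_records ++ [record] else filtered_records) []

-- ===== PORT B =====
-- 'r.get(column) in values' (None is never in a list of ints)
def pvBKeep (column : String) (values : List Int) (r : List (String × Int)) : Bool :=
  match (PySem.Dict.mk r).get? column with
  | none => false
  | some v => values.contains v

def filter_players_alt (records : List (List (String × Int))) (criteria : List (String × List Int)) : List (List (String × Int)) :=
  criteria.foldl (fun result cv => result.filter (pvBKeep cv.1 cv.2)) records

-- ===== PRECONDITION & SPEC =====
def Spec_filter_players (records : List (List (String × Int))) (criteria : List (String × List Int)) (out : List (List (String × Int))) : Prop := out = filter_players_alt records criteria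
instance (records : List (List (String × Int))) (criteria : List (String × List Int)) (out : List (List (String × Int))) : Decidable (Spec_filter_players records criteria out) := by unfold Spec_filter_players; infer_instance

-- ===== CLAIM (what is proved, stated in full; the proofs are below) =====
def Claim_equal_filter_players : Prop := ∀ (records : List (List (String × Int))) (criteria : List (String × List Int)), Dom_filter_players records criteria → Spec_filter_players records criteria (filter_players records criteria)

-- ===== LEMMAS AND PROOFS =====

theorem pvAValid_cons (record : List (String × Int)) (c : String) (vs : List Int) (rest : List (String × List Int)) :
    pvAValid record ((c, vs) :: rest) = (pvBKeep c vs record && pvAValid record rest) := by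
  simp only [pvAValid, pvBKeep]
  cases (PySem.Dict.mk record).get? c with
  | none => simp
  | some v => cases vs.contains v <;> simp

theorem filter_players_eq_filter (records : List (List (String × Int))) (criteria : List (String × List Int)) :
    filter_players records criteria = records.filter (fun r => pvAValid r criteria) := by
  simpa using PySem.List.foldl_append_if_eq_filter (fun r => pvAValid r criteria) records []

theorem alt_eq_filter (criteria : List (String × List Int)) (records : List (List (String × Int))) :
    filter_players_alt records criteria = records.filter (fun r => pvAValid r criteria) := by
  induction criteria generalizing records with
  | nil => simp [filter_players_alt, pvAValid]
  | cons cv rest ih =>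
    simp only [filter_players_alt, List.foldl_cons] at *
    rw [ih (records.filter (pvBKeep cv.1 cv.2)), List.filter_filter]
    refine List.filter_congr ?_
    intro r _
    obtain ⟨c, vs⟩ := cv
    rw [pvAValid_cons, Bool.and_comm]

-- ===== VERDICT (by name: the statement is the Claim_ definition above) =====
theorem filter_players_spec : Claim_equal_filter_players := by
  intro records criteria _
  unfold Spec_filter_players
  rw [filter_players_eq_filter, alt_eq_filter]
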